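-- pv_equiv track=rewrite | github.com/limgunny/ddw-backend-v2 | SteganoDCT.py | _string_to_bits
-- ===== SOURCE A (Python) =====
-- def _string_to_bits(message: str) -> list:
--     """문자열을 비트 리스트로 변환"""
--     # 메시지를 바이트로 변환한 후 비트로 변환
--     byte_array = message.encode('utf-8')
--     bits = []
--     for byte in byte_array:
--         for i in range(7, -1, -1):  # 최상위 비트(MSB)부터
--             bits.append((byte >> i) & 1)
--
--     # 종료 시퀀스(16개의 1) 추가
--     bits.extend([1] * 16)
--     return bits
-- ===== SOURCE B (Python) =====
-- def _string_to_bits(message: str) -> list: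
--     """문자열을 비트 리스트로 변환 (built back-to-front)"""
--     acc = [1] * 16
--     for byte in reversed(message.encode('utf-8')):
--         for _ in range(8):
--             acc.append(byte & 1)
--             byte >>= 1
--     acc.reverse()
--     return acc
-- ===== Notes on version B (the rewrite author's own statement) =====
-- stated objective: alternative
-- what changed: B builds the bit list back-to-front: it starts from the 16-one terminator, walks the bytes in reverse emitting each byte's bits LSB-first by repeated mask-and-halve of a mutable byte value, and reverses once at the end, instead of A's forward nested loops shifting by a descending bit index.
import Mathlib
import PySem

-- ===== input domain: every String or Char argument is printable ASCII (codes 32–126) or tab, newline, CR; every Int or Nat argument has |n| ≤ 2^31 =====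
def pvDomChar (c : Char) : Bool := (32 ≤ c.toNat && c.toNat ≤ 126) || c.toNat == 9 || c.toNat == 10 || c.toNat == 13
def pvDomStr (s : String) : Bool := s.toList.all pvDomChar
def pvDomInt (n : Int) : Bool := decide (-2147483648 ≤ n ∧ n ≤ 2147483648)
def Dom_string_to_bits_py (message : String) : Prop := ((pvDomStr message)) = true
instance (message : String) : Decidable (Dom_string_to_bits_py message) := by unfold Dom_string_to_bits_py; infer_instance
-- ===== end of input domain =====

-- B builds the list back-to-front: terminator first, bytes reversed, each byte's bits
-- LSB-first by mask-and-halve, one final reverse (objective: alternative decomposition).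

-- ===== PORT A =====
-- message.encode('utf-8'): on the ASCII domain the bytes are exactly the character codes.
def string_to_bits_py (message : String) : List Int :=
  let byteArray : List Nat := message.toList.map Char.toNat
  let bits : List Int :=
    byteArray.foldl
      (fun bits byte =>
        (PySem.List.pyRange 7 (-1) (-1)).foldl
          (fun bits i => bits ++ [(((byte >>> i.toNat) &&& 1 : Nat) : Int)]) bits)
      []
  bits ++ List.replicate 16 1

-- ===== PORT B =====
-- inner 'for _ in range(8): acc.append(byte & 1); byte >>= 1'
def pvEmitLSB : Nat → Nat → List Int → List Int
  | 0, _, acc => acc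
  | k + 1, byte, acc => pvEmitLSB k (byte >>> 1) (acc ++ [(((byte &&& 1 : Nat)) : Int)])

def string_to_bits_py_alt (message : String) : List Int :=
  let acc : List Int :=
    (message.toList.map Char.toNat).reverse.foldl
      (fun acc byte => pvEmitLSB 8 byte acc)
      (List.replicate 16 1)
  acc.reverse

-- ===== PRECONDITION & SPEC =====
def Spec_string_to_bits_py (message : String) (out : List Int) : Prop := out = string_to_bits_py_alt message
instance (message : String) (out : List Int) : Decidable (Spec_string_to_bits_py message out) := by unfold Spec_string_to_bits_py; infer_instance

-- ===== CLAIM (what is proved, stated in full; the proofs are below) =====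
def Claim_equal_string_to_bits_py : Prop := ∀ (message : String), Dom_string_to_bits_py message → Spec_string_to_bits_py message (string_to_bits_py message)

-- ===== LEMMAS AND PROOFS =====

-- the bits A emits for one byte (MSB first)
def pvByteBits (b : Nat) : List Int :=
  (PySem.List.pyRange 7 (-1) (-1)).map (fun i => (((b >>> i.toNat) &&& 1 : Nat) : Int))

lemma pvEmitLSB_eq (b : Nat) (acc : List Int) :
    pvEmitLSB 8 b acc = acc ++ (pvByteBits b).reverse := by
  simp [pvEmitLSB, pvByteBits, PySem.List.pyRange, Nat.shiftRight_succ,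
    List.range_succ, Nat.shiftRight_eq_div_pow]
  omega

-- ===== VERDICT (by name: the statement is the Claim_ definition above) =====
theorem string_to_bits_py_spec : Claim_equal_string_to_bits_py := by
  intro message _
  unfold Spec_string_to_bits_py string_to_bits_py string_to_bits_py_alt
  have hinner : ∀ (byte : Nat) (bits : List Int),
      (PySem.List.pyRange 7 (-1) (-1)).foldl
        (fun bits i => bits ++ [(((byte >>> i.toNat) &&& 1 : Nat) : Int)]) bits
        = bits ++ pvByteBits byte := by
    intro byte bits
    rw [PySem.List.foldl_append_singleton_eq_map]
    rfl
  simp only [hinner]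
  rw [PySem.List.foldl_append_eq_flatMap, List.nil_append]
  have hB : ∀ (acc : List Int),
      (message.toList.map Char.toNat).reverse.foldl (fun acc byte => pvEmitLSB 8 byte acc) acc
        = acc ++ (message.toList.map Char.toNat).reverse.flatMap
            (fun b => (pvByteBits b).reverse) := by
    intro acc
    simp only [pvEmitLSB_eq]
    exact PySem.List.foldl_append_eq_flatMap _ _ _
  rw [hB, List.reverse_append, List.reverse_flatMap, List.reverse_reverse]
  refine congrArg₂ _ (List.flatMap_congr ?_) rfl
  intro b _
  simp
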